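-- pv_equiv track=rewrite | github.com/sasverdlov/my_secret_candy_crush | match_finder.py | _is_3_in_line_match
-- ===== SOURCE A (Python) =====
-- from collections import deque, defaultdict, Counter
--
-- def _is_3_in_line_match(match):
--     if len(match) < 3:
--         return False
--     rows = Counter([x for x, y in match])
--     columns = Counter([y for x, y in match])
--     for i, v in rows.items():
--         if v >= 3:
--             return True
--     for i, v in columns.items():
--         if v >= 3:
--             return True
--     return False
-- ===== SOURCE B (Python) =====
-- def _is_3_in_line_match(match):
--     # sort each coordinate list and look for a run of 3 equal values
--     for key in (0, 1):
--         vals = sorted(m[key] for m in match)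
--         prev = None
--         run = 0
--         for v in vals:
--             run = run + 1 if v == prev else 1
--             prev = v
--             if run >= 3:
--                 return True
--     return False
-- ===== Notes on version B (the rewrite author's own statement) =====
-- stated objective: alternative
-- what changed: Replaces the two Counter frequency tables and dict-item scans with sort-by-coordinate plus a single run-length scan over each sorted coordinate list, returning True when a run of equal values reaches 3.
import Mathlib
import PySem

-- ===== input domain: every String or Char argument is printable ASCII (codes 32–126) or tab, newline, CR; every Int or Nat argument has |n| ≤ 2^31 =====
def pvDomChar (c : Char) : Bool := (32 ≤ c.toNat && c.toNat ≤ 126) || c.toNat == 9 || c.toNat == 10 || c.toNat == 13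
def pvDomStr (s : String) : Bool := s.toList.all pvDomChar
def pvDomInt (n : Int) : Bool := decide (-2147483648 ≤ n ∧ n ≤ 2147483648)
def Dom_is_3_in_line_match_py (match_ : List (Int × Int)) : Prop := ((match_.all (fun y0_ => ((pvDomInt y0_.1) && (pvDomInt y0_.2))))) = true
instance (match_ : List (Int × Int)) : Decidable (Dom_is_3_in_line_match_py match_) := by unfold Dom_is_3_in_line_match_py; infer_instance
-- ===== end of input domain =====

-- B replaces A's two Counter frequency tables by sorting each coordinate list and run-scanning it once for 3 equal values in a row (alternative decomposition, similar cost).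

-- ===== PORT A =====
def is_3_in_line_match_py (match_ : List (Int × Int)) : Bool :=
  if PySem.List.len match_ < 3 then false
  else
    let rows := PySem.Dict.counter (match_.map (fun p => p.1))
    let columns := PySem.Dict.counter (match_.map (fun p => p.2))
    if rows.items.any (fun iv => 3 ≤ iv.2) then true
    else if columns.items.any (fun iv => 3 ≤ iv.2) then true
    else false

-- ===== PORT B =====
-- inner 'for v in vals' loop of Source B: prev/run state, early return True when run reaches 3
def pvRunScan : Option Int → Int → List Int → Bool
  | _, _, [] => false
  | prev, run, v :: t =>
    let run' := if some v = prev then run + 1 else 1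
    if 3 ≤ run' then true else pvRunScan (some v) run' t

-- one iteration of Source B's 'for key in (0, 1)' loop: sort the projected values, run-scan them
def pvCheckKey (xs : List Int) : Bool :=
  pvRunScan none 0 (PySem.List.sorted xs (fun x => x) false)

def is_3_in_line_match_py_alt (match_ : List (Int × Int)) : Bool :=
  pvCheckKey (match_.map (fun m => m.1)) || pvCheckKey (match_.map (fun m => m.2))

-- ===== PRECONDITION & SPEC =====
def Spec_is_3_in_line_match_py (match_ : List (Int × Int)) (out : Bool) : Prop := out = is_3_in_line_match_py_alt match_
instance (match_ : List (Int × Int)) (out : Bool) : Decidable (Spec_is_3_in_line_match_py match_ out) := by unfold Spec_is_3_in_line_match_py; infer_instance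

-- ===== CLAIM (what is proved, stated in full; the proofs are below) =====
def Claim_equal_is_3_in_line_match_py : Prop := ∀ (match_ : List (Int × Int)), Dom_is_3_in_line_match_py match_ → Spec_is_3_in_line_match_py match_ (is_3_in_line_match_py match_)

-- ===== LEMMAS AND PROOFS =====

-- run-scan invariant: prev = p, run = k with 1 ≤ k ≤ 2, on a sorted tail all ≥ p;
-- it returns true iff p's run completes to 3 or some later value occurs 3 times
lemma pvRunScan_iff (l : List Int) : ∀ (p k : Int),
    l.Pairwise (· ≤ ·) → (∀ x ∈ l, p ≤ x) → 1 ≤ k → k ≤ 2 →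
    (pvRunScan (some p) k l = true ↔
      3 ≤ k + (l.count p : Int) ∨ ∃ v ∈ l, v ≠ p ∧ 3 ≤ (l.count v : Int)) := by
  induction l with
  | nil =>
    intro p k _ _ h1 h2
    simp [pvRunScan]
    omega
  | cons v t ih =>
    intro p k hs hp h1 h2
    have hvp : p ≤ v := hp v (by simp)
    have hst : t.Pairwise (· ≤ ·) := hs.of_cons
    have hvt : ∀ x ∈ t, v ≤ x := fun x hx => (List.pairwise_cons.mp hs).1 x hx
    by_cases hv : v = p
    · subst hv
      simp only [pvRunScan, if_pos]
      by_cases h3 : (3:Int) ≤ k + 1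
      · rw [if_pos h3]
        constructor
        · intro _
          left
          have : (1:Int) ≤ ((v :: t).count v : Int) := by
            simp [List.count_cons_self]
          omega
        · intro _; rfl
      · rw [if_neg h3]
        have hk1 : k = 1 := by omega
        subst hk1
        rw [show (1:Int)+1 = 2 from by norm_num, ih v 2 hst hvt (by norm_num) (by norm_num)]
        constructor
        · rintro (h | ⟨w, hw, hwv, hc⟩)
          · left
            rw [List.count_cons_self]
            push_cast
            omega
          · right
            exact ⟨w, by simp [hw], by
              intro h; exact hwv h, by
              rw [List.count_cons_of_ne (by exact fun h => hwv h.symm)]; exact hc⟩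
        · rintro (h | ⟨w, hw, hwv, hc⟩)
          · left
            rw [List.count_cons_self] at h
            push_cast at h ⊢
            omega
          · rcases List.mem_cons.mp hw with h | h
            · exact absurd h hwv
            · right
              refine ⟨w, h, hwv, ?_⟩
              rwa [List.count_cons_of_ne (fun hh => hwv hh.symm)] at hc
    · -- v ≠ p: p < v, p not in t
      have hpv : p < v := lt_of_le_of_ne hvp (fun h => hv h.symm)
      have hpnott : (v :: t).count p = 0 := by
        rw [List.count_eq_zero]
        intro hmem
        rcases List.mem_cons.mp hmem with h | h
        · exact hv h.symm
        · exact absurd (hvt p h) (by omega)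
      simp only [pvRunScan]
      rw [if_neg (show ¬(some v = some p) by simpa using hv)]
      rw [if_neg (show ¬(3:Int) ≤ 1 by norm_num)]
      rw [ih v 1 hst hvt (by norm_num) (by norm_num)]
      rw [hpnott]
      constructor
      · rintro (h | ⟨w, hw, hwv, hc⟩)
        · right
          refine ⟨v, by simp, hv, ?_⟩
          rw [List.count_cons_self]
          push_cast at h ⊢
          omega
        · right
          refine ⟨w, by simp [hw], ?_, ?_⟩
          · intro h; subst h
            exact absurd (hvt w hw) (by omega)
          · rwa [List.count_cons_of_ne (fun hh => hwv hh.symm)]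
      · rintro (h | ⟨w, hw, hwp, hc⟩)
        · push_cast at h; omega
        · rcases List.mem_cons.mp hw with h | h
          · subst h
            left
            rw [List.count_cons_self] at hc
            push_cast at hc ⊢
            omega
          · by_cases hwv2 : w = v
            · subst hwv2
              left
              rw [List.count_cons_self] at hc
              push_cast at hc ⊢
              omega
            · right
              refine ⟨w, h, hwv2, ?_⟩
              rwa [List.count_cons_of_ne (fun hh => hwv2 hh.symm)] at hc

-- Source B's per-coordinate check is exactly "some value occurs ≥ 3 times"
lemma pvCheckKey_iff (xs : List Int) :
    pvCheckKey xs = true ↔ ∃ v ∈ xs, 3 ≤ (xs.count v : Int) := by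
  unfold pvCheckKey
  have hperm := PySem.List.sorted_perm (xs := xs) (key := fun x => x) (rev := false)
  have hpw := PySem.List.sorted_pairwise (xs := xs) (key := fun x => x)
  rcases hh : PySem.List.sorted xs (fun x => x) false with _ | ⟨v, t⟩
  · rw [hh] at hperm
    have : xs = [] := hperm.symm.eq_nil
    subst this
    simp [pvRunScan]
  · rw [hh] at hperm hpw
    have hst : t.Pairwise (· ≤ ·) := by
      have := List.pairwise_cons.mp hpw; exact this.2
    have hvt : ∀ x ∈ t, v ≤ x := fun x hx => (List.pairwise_cons.mp hpw).1 x hx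
    have step : pvRunScan none 0 (v :: t) = pvRunScan (some v) 1 t := by
      simp [pvRunScan]
    rw [step, pvRunScan_iff t v 1 hst hvt (by norm_num) (by norm_num)]
    constructor
    · rintro (h | ⟨w, hw, hwv, hc⟩)
      · refine ⟨v, hperm.mem_iff.mp (by simp), ?_⟩
        rw [← hperm.count_eq, List.count_cons_self]
        push_cast at h ⊢
        omega
      · refine ⟨w, hperm.mem_iff.mp (by simp [hw]), ?_⟩
        rw [← hperm.count_eq, List.count_cons_of_ne (fun hh2 => hwv hh2.symm)]
        exact hc
    · rintro ⟨w, hw, hc⟩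
      rw [← hperm.count_eq] at hc
      by_cases hwv : w = v
      · subst hwv
        rw [List.count_cons_self] at hc
        push_cast at hc ⊢
        left; omega
      · right
        refine ⟨w, ?_, hwv, ?_⟩
        · have : w ∈ v :: t := hperm.mem_iff.mpr hw
          rcases List.mem_cons.mp this with h | h
          · exact absurd h hwv
          · exact h
        · rwa [List.count_cons_of_ne (fun hh2 => hwv hh2.symm)] at hc

-- A's Counter-items scan is the same condition
lemma pvCounterAny_iff (xs : List Int) :
    ((PySem.Dict.counter xs).items.any (fun iv => 3 ≤ iv.2)) = true ↔
      ∃ v ∈ xs, 3 ≤ (xs.count v : Int) := by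
  rw [PySem.Dict.items_counter]
  simp [List.any_eq_true, PySem.Set.mem_ofList]

-- ===== VERDICT (by name: the statement is the Claim_ definition above) =====
theorem is_3_in_line_match_py_spec : Claim_equal_is_3_in_line_match_py := by
  intro match_ _
  unfold Spec_is_3_in_line_match_py
  have hA : ∀ xs : List Int,
      ((PySem.Dict.counter xs).items.any (fun iv => 3 ≤ iv.2)) = pvCheckKey xs := by
    intro xs; rw [Bool.eq_iff_iff, pvCounterAny_iff, pvCheckKey_iff]
  simp only [is_3_in_line_match_py, is_3_in_line_match_py_alt]
  by_cases hlen : PySem.List.len match_ < 3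
  · rw [if_pos hlen]
    have hsmall : ∀ xs : List Int, xs.length = match_.length → pvCheckKey xs = false := by
      intro xs hx
      rw [← Bool.not_eq_true, pvCheckKey_iff]
      rintro ⟨v, hv, hc⟩
      have h1 : xs.count v ≤ xs.length := List.count_le_length
      simp only [PySem.List.len] at hlen
      have h2 : match_.length < 3 := by exact_mod_cast hlen
      omega
    rw [hsmall (match_.map (fun m => m.1)) (by simp), hsmall (match_.map (fun m => m.2)) (by simp)]
    rfl
  · rw [if_neg hlen]
    simp only [hA]
    cases pvCheckKey (match_.map (fun m => m.1)) <;>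
      cases pvCheckKey (match_.map (fun m => m.2)) <;> simp
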